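-- pv_equiv track=rewrite | github.com/gsergom/YouSet | YouSet/modules/complexbuilder.py | UsedIdentifiers
-- ===== SOURCE A (Python) =====
-- def UsedIdentifiers(equivalences):
-- 	"""Reads all the identifiers that have already been used by the user or have been newly added to the complex.
--
-- 	Arguments:
-- 		equivalences -- dictionary with chain IDs as keys and the equivalent IDs as values
--
-- 	Returns:
-- 		List with the identifiers
-- 	"""
--
-- 	str_chains = []
-- 	int_chains = []
-- 	for element in equivalences:
-- 		for x in equivalences[element]:
-- 			if x in ['1','2','3','4','5','6','7','8','9']:
-- 				int_chains.append(x)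
-- 			else:
-- 				str_chains.append(x)
-- 	str_chains = sorted(str_chains)
-- 	int_chains = sorted(int_chains)
-- 	for element in int_chains:
-- 		str_chains.append(element)
-- 	return str_chains
-- ===== SOURCE B (Python) =====
-- def UsedIdentifiers(equivalences):
-- 	digits = {'1','2','3','4','5','6','7','8','9'}
-- 	items = [x for vals in equivalences.values() for x in vals]
-- 	return sorted(items, key=lambda x: (x in digits, x))
-- ===== Notes on version B (the rewrite author's own statement) =====
-- stated objective: simpler
-- what changed: Replaces A's two partition accumulators, two separate sorts and the element-by-element concatenation loop with a single flatten of the dict values and one stable sort keyed by the pair (is-single-digit flag, value).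
import Mathlib
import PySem

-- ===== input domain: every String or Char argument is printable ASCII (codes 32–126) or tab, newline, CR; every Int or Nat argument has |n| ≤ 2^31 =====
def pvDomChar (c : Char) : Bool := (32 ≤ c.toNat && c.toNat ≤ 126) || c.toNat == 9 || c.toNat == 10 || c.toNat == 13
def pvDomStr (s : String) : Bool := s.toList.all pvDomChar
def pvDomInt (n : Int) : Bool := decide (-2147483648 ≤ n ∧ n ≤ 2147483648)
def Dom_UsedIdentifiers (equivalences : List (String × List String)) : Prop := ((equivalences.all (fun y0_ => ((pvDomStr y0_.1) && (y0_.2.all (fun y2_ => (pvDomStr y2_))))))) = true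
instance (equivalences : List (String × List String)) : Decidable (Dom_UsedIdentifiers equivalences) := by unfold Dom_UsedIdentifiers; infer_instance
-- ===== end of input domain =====

-- B replaces A's two partition lists, two separate sorts and the concatenation loop
-- with one flatten and a single stable sort keyed by (is-single-digit flag, value): simpler, same cost.


-- ===== PORT A =====
-- 'for element in equivalences' iterates the dict's keys; 'equivalences[element]' is a lookup.
def UsedIdentifiers (equivalences : List (String × List String)) : List String :=
  let d := PySem.Dict.mk equivalences
  let chains := d.keys.foldl
    (fun acc element =>
      (d.getD element []).foldl
        (fun acc x =>
          if (["1","2","3","4","5","6","7","8","9"] : List String).contains x then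
            (acc.1, acc.2 ++ [x])
          else
            (acc.1 ++ [x], acc.2))
        acc)
    ([], [])
  let str_chains := PySem.List.sorted chains.1 (fun x => x) false
  let int_chains := PySem.List.sorted chains.2 (fun x => x) false
  int_chains.foldl (fun acc element => acc ++ [element]) str_chains

-- ===== PORT B =====
def UsedIdentifiers_alt (equivalences : List (String × List String)) : List String :=
  let digits : PySem.Set String := PySem.Set.ofList ["1","2","3","4","5","6","7","8","9"]
  let items := (PySem.Dict.mk equivalences).values.flatMap (fun vals => vals)
  PySem.List.sorted2 items (fun x => PySem.Set.contains digits x) (fun x => x) false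

-- ===== PRECONDITION & SPEC =====
-- Pre_ excludes association lists with duplicate keys: those do not represent any Python dict
-- (the Python function's argument is a dict, whose keys are necessarily distinct).
def Pre_UsedIdentifiers (equivalences : List (String × List String)) : Prop :=
  (equivalences.map (·.1)).Nodup
instance (equivalences : List (String × List String)) : Decidable (Pre_UsedIdentifiers equivalences) := by
  unfold Pre_UsedIdentifiers; infer_instance

def pvWitness_UsedIdentifiers : (List (String × List String)) :=
  [("A", ["b", "2"]), ("B", ["1", "zz"])]

def Spec_UsedIdentifiers (equivalences : List (String × List String)) (out : List String) : Prop := out = UsedIdentifiers_alt equivalences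
instance (equivalences : List (String × List String)) (out : List String) : Decidable (Spec_UsedIdentifiers equivalences out) := by unfold Spec_UsedIdentifiers; infer_instance

-- ===== CLAIM (what is proved, stated in full; the proofs are below) =====
def Claim_equal_UsedIdentifiers : Prop := ∀ (equivalences : List (String × List String)), Dom_UsedIdentifiers equivalences → Pre_UsedIdentifiers equivalences → Spec_UsedIdentifiers equivalences (UsedIdentifiers equivalences)

-- ===== LEMMAS AND PROOFS =====

-- the digit test both ports make, as a named predicate for the proofs
def pvIsDigit (x : String) : Bool := (["1","2","3","4","5","6","7","8","9"] : List String).contains x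

-- the combined sort key of B, seen through the lexicographic order on Bool × String
def pvKey (x : String) : Lex (Bool × String) := toLex (pvIsDigit x, x)

lemma pvKey_injective : Function.Injective pvKey := by
  intro a b h
  have := congrArg (fun p => (ofLex p).2) h
  simpa [pvKey] using this

-- sorted2 with keys (k1, k2) is sorted with the lexicographic key toLex (k1 x, k2 x)
lemma sorted2_eq_sorted_lex {α : Type} (xs : List α) (k1 : α → Bool) (k2 : α → String) :
    PySem.List.sorted2 xs k1 k2 false
      = PySem.List.sorted xs (fun x => toLex (k1 x, k2 x)) false := by
  have hbef : (fun (a b : α) => decide (k1 a < k1 b) || (!decide (k1 b < k1 a) && decide (k2 a < k2 b)))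
      = (fun a b => decide ((fun x => toLex (k1 x, k2 x)) a < (fun x => toLex (k1 x, k2 x)) b)) := by
    funext a b
    rw [show (!decide (k1 b < k1 a)) = decide (¬ k1 b < k1 a) by rw [decide_not],
        ← Bool.decide_and, ← Bool.decide_or, decide_eq_decide,
        Prod.Lex.toLex_lt_toLex]
    cases h1 : k1 a <;> cases h2 : k1 b <;> simp [Bool.lt_iff]
  show xs.foldl (fun acc x => PySem.List.insertBy
      (fun a b => decide (k1 a < k1 b) || (!decide (k1 b < k1 a) && decide (k2 a < k2 b))) x acc) [] = _
  rw [hbef, PySem.List.sorted_eq_foldl_insertBy]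

-- B's flattened item list
def pvItems (equivalences : List (String × List String)) : List String :=
  equivalences.flatMap (fun p => p.2)

lemma alt_eq_sorted_key (equivalences : List (String × List String)) :
    UsedIdentifiers_alt equivalences
      = PySem.List.sorted (pvItems equivalences) pvKey false := by
  show PySem.List.sorted2 _ _ _ false = _
  rw [sorted2_eq_sorted_lex]
  have hitems : (PySem.Dict.mk equivalences).values.flatMap (fun vals => vals)
      = pvItems equivalences := by
    rw [PySem.Dict.values_mk, pvItems]
    simp [List.flatMap_def, List.map_map, Function.comp_def]
  have hkey : (fun x => toLex (PySem.Set.contains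
        (PySem.Set.ofList (["1","2","3","4","5","6","7","8","9"] : List String)) x, x)) = pvKey := by
    funext x
    have hset : PySem.Set.ofList (["1","2","3","4","5","6","7","8","9"] : List String)
        = (["1","2","3","4","5","6","7","8","9"] : List String) := by decide
    rw [pvKey]
    have : PySem.Set.contains
        (PySem.Set.ofList (["1","2","3","4","5","6","7","8","9"] : List String)) x = pvIsDigit x := by
      rw [hset]; rfl
    rw [this]
  rw [hitems, hkey]

-- A's partition loop, normalised: the pair of filters of the flattened items
lemma a_chains (equivalences : List (String × List String))
    (hnd : (equivalences.map (·.1)).Nodup) :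
    (PySem.Dict.mk equivalences).keys.foldl
      (fun acc element =>
        ((PySem.Dict.mk equivalences).getD element []).foldl
          (fun acc x =>
            if (["1","2","3","4","5","6","7","8","9"] : List String).contains x then
              (acc.1, acc.2 ++ [x])
            else (acc.1 ++ [x], acc.2))
          acc)
      ([], [])
    = ((pvItems equivalences).filter (fun x => !pvIsDigit x),
       (pvItems equivalences).filter pvIsDigit) := by
  rw [PySem.Dict.keys_mk, List.foldl_map]
  show equivalences.foldl
      (fun acc p =>
        ((PySem.Dict.mk equivalences).getD p.1 []).foldl
          (fun acc x => if pvIsDigit x then (acc.1, acc.2 ++ [x]) else (acc.1 ++ [x], acc.2)) acc)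
      ([], []) = _
  have hlook : ∀ (acc : List String × List String), ∀ p ∈ equivalences,
      ((PySem.Dict.mk equivalences).getD p.1 []).foldl
          (fun acc x => if pvIsDigit x then (acc.1, acc.2 ++ [x]) else (acc.1 ++ [x], acc.2)) acc
        = p.2.foldl
          (fun acc x => if pvIsDigit x then (acc.1, acc.2 ++ [x]) else (acc.1 ++ [x], acc.2)) acc := by
    intro acc p hp
    have : (PySem.Dict.mk equivalences).getD p.1 [] = p.2 := by
      refine PySem.Dict.getD_of_mem_items (PySem.Dict.mk equivalences) ?_ ?_ []
      · exact hp
      · rw [PySem.Dict.keys_mk]; exact hnd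
    rw [this]
  rw [PySem.List.foldl_congr_mem equivalences _ _ _ hlook]
  have hflat :
      equivalences.foldl
        (fun acc p => p.2.foldl
          (fun acc x => if pvIsDigit x then (acc.1, acc.2 ++ [x]) else (acc.1 ++ [x], acc.2)) acc)
        ([], [])
      = (pvItems equivalences).foldl
          (fun acc x => if pvIsDigit x then (acc.1, acc.2 ++ [x]) else (acc.1 ++ [x], acc.2))
          ([], []) := by
    rw [pvItems, List.flatMap_def, List.foldl_flatten, List.foldl_map]
  rw [hflat]
  have hstep : (fun (acc : List String × List String) x =>
        if pvIsDigit x then (acc.1, acc.2 ++ [x]) else (acc.1 ++ [x], acc.2))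
      = (fun acc x => ((if !pvIsDigit x then acc.1 ++ [x] else acc.1),
                       (if pvIsDigit x then acc.2 ++ [x] else acc.2))) := by
    funext acc x
    by_cases h : pvIsDigit x = true <;> simp [h]
  rw [hstep]
  rw [PySem.List.foldl_prod_mk
      (f := fun a x => if !pvIsDigit x then a ++ [x] else a)
      (g := fun a x => if pvIsDigit x then a ++ [x] else a)]
  rw [PySem.List.foldl_append_if_eq_filter, PySem.List.foldl_append_if_eq_filter]
  simp

lemma a_eq (equivalences : List (String × List String))
    (hnd : (equivalences.map (·.1)).Nodup) :
    UsedIdentifiers equivalences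
      = PySem.List.sorted ((pvItems equivalences).filter (fun x => !pvIsDigit x)) (fun x => x) false
        ++ PySem.List.sorted ((pvItems equivalences).filter pvIsDigit) (fun x => x) false := by
  simp only [UsedIdentifiers]
  rw [PySem.List.foldl_append_singleton_eq_self]
  rw [a_chains equivalences hnd]

lemma mem_filter_isdigit_flag (l : List String) :
    (∀ x ∈ l.filter (fun x => !pvIsDigit x), pvIsDigit x = false)
      ∧ (∀ x ∈ l.filter pvIsDigit, pvIsDigit x = true) := by
  constructor <;> intro x hx <;> simpa using (List.of_mem_filter hx)

-- ===== VERDICT (by name: the statement is the Claim_ definition above) =====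
theorem UsedIdentifiers_spec : Claim_equal_UsedIdentifiers := by
  intro equivalences _ hpre
  unfold Spec_UsedIdentifiers
  rw [a_eq equivalences hpre, alt_eq_sorted_key]
  set strs := (pvItems equivalences).filter (fun x => !pvIsDigit x) with hstrs
  set ints := (pvItems equivalences).filter pvIsDigit with hints
  refine (PySem.List.eq_of_perm_of_pairwise_le_of_injective pvKey pvKey_injective ?_ ?_ ?_).symm
  · -- permutation
    have h1 : (PySem.List.sorted (pvItems equivalences) pvKey false).Perm (pvItems equivalences) :=
      PySem.List.sorted_perm (pvItems equivalences) pvKey false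
    have h2 : (PySem.List.sorted strs (fun x : String => x) false).Perm strs :=
      PySem.List.sorted_perm strs (fun x => x) false
    have h3 : (PySem.List.sorted ints (fun x : String => x) false).Perm ints :=
      PySem.List.sorted_perm ints (fun x => x) false
    have h4 : (strs ++ ints).Perm (pvItems equivalences) := by
      simpa [hstrs, hints] using
        List.filter_append_perm (fun x => !pvIsDigit x) (pvItems equivalences)
    exact h1.trans ((h2.append h3).trans h4).symm
  · -- B side pairwise
    exact PySem.List.sorted_pairwise (pvItems equivalences) pvKey
  · -- A side pairwise
    rw [List.pairwise_append]
    refine ⟨?_, ?_, ?_⟩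
    · refine (PySem.List.sorted_pairwise strs (fun x => x)).imp_of_mem ?_
      intro a b ha hb hle
      have ha' := (mem_filter_isdigit_flag (pvItems equivalences)).1 a
        (by simpa [PySem.List.mem_sorted, hstrs] using ha)
      have hb' := (mem_filter_isdigit_flag (pvItems equivalences)).1 b
        (by simpa [PySem.List.mem_sorted, hstrs] using hb)
      rw [pvKey, pvKey, Prod.Lex.toLex_le_toLex]
      exact Or.inr ⟨by rw [ha', hb'], hle⟩
    · refine (PySem.List.sorted_pairwise ints (fun x => x)).imp_of_mem ?_
      intro a b ha hb hle
      have ha' := (mem_filter_isdigit_flag (pvItems equivalences)).2 a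
        (by simpa [PySem.List.mem_sorted, hints] using ha)
      have hb' := (mem_filter_isdigit_flag (pvItems equivalences)).2 b
        (by simpa [PySem.List.mem_sorted, hints] using hb)
      rw [pvKey, pvKey, Prod.Lex.toLex_le_toLex]
      exact Or.inr ⟨by rw [ha', hb'], hle⟩
    · intro a ha b hb
      have ha' := (mem_filter_isdigit_flag (pvItems equivalences)).1 a
        (by simpa [PySem.List.mem_sorted, hstrs] using ha)
      have hb' := (mem_filter_isdigit_flag (pvItems equivalences)).2 b
        (by simpa [PySem.List.mem_sorted, hints] using hb)
      rw [pvKey, pvKey, Prod.Lex.toLex_le_toLex]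
      exact Or.inl (by rw [ha', hb']; exact Bool.lt_iff.mpr ⟨rfl, rfl⟩)
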